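-- pv_equiv track=rewrite | github.com/dylancluyse/Algo20212022 | Hoofdstuk 5/achterhoede.py | zien
-- ===== SOURCE A (Python) =====
-- def zien(invoer):
--
--     if isinstance(invoer, str):
--         invoer = list(str(invoer))
--
--     n = len(invoer)
--
--     nieuweLijst = []
--
--     for i in range(n-1, -1, -1):
--         aantalRood = 0
--
--         for j in range(i-1, -1, -1):
--             if invoer[j] == 'R':
--                 aantalRood += 1
--
--         if aantalRood % 2 == 0:
--             nieuweLijst.append('B')
--         else:
--             nieuweLijst.append('R')
--
--     nieuweLijst.reverse()
--
--     return tuple(nieuweLijst)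
-- ===== SOURCE B (Python) =====
-- def zien(invoer):
--     # One pass with a running count of red elements seen so far (O(n) instead of O(n^2)).
--     if isinstance(invoer, str):
--         invoer = list(str(invoer))
--
--     uit = []
--     rood = 0
--     for kleur in invoer:
--         uit.append('B' if rood % 2 == 0 else 'R')
--         if kleur == 'R':
--             rood += 1
--
--     return tuple(uit)
-- ===== Notes on version B (the rewrite author's own statement) =====
-- stated objective: faster
-- what changed: Replaced the nested loop that recounts the preceding red elements for every position by a single pass maintaining a running prefix count of red elements.
import Mathlib
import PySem

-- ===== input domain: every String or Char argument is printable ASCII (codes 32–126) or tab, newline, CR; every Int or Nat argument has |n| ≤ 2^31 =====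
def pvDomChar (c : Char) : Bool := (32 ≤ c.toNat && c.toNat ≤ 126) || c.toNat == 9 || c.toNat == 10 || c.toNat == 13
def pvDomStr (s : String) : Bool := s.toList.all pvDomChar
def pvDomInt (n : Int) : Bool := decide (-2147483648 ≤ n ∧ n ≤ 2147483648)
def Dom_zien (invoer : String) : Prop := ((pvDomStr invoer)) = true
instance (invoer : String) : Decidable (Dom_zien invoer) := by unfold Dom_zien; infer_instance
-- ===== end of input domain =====

-- B replaces A's nested loop (recounting the preceding red elements for every position)
-- by a single pass with a running prefix count of red elements.

-- ===== PORT A =====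
-- inner loop: for j in range(i-1, -1, -1): if invoer[j] == 'R': aantalRood += 1
def zienAantalRood (cs : List Char) (i : Int) : Int :=
  (PySem.List.pyRange (i - 1) (-1) (-1)).foldl
    (fun aantalRood j => if PySem.List.pyGetD cs j ' ' = 'R' then aantalRood + 1 else aantalRood) 0

def zien (invoer : String) : List String :=
  let cs := invoer.toList
  let n : Int := PySem.List.len cs
  let nieuweLijst :=
    (PySem.List.pyRange (n - 1) (-1) (-1)).foldl
      (fun nieuweLijst i =>
        let aantalRood := zienAantalRood cs i
        if PySem.Int.mod aantalRood 2 = 0 then nieuweLijst ++ ["B"] else nieuweLijst ++ ["R"])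
      []
  nieuweLijst.reverse

-- ===== PORT B =====
def zien_alt (invoer : String) : List String :=
  let st := invoer.toList.foldl
    (fun (st : List String × Int) kleur =>
      (st.1 ++ [if PySem.Int.mod st.2 2 = 0 then "B" else "R"],
       if kleur = 'R' then st.2 + 1 else st.2))
    ([], 0)
  st.1

-- ===== PRECONDITION & SPEC =====
def Spec_zien (invoer : String) (out : List String) : Prop := out = zien_alt invoer
instance (invoer : String) (out : List String) : Decidable (Spec_zien invoer out) := by unfold Spec_zien; infer_instance

-- ===== CLAIM (what is proved, stated in full; the proofs are below) =====
def Claim_equal_zien : Prop := ∀ (invoer : String), Dom_zien invoer → Spec_zien invoer (zien invoer)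

-- ===== LEMMAS AND PROOFS =====

-- the common characterisation: position k gets 'B' iff the number of 'R' among the first k chars is even
def zienRef (cs : List Char) : List String :=
  (List.range cs.length).map (fun k =>
    if ((((cs.take k).count 'R' : Nat) : Int)) % 2 = 0 then "B" else "R")

-- A's inner loop counts the 'R's among the first k characters
lemma zienAantalRood_eq (cs : List Char) (k : Nat) (hk : k ≤ cs.length) :
    zienAantalRood cs (k : Int) = (((cs.take k).count 'R' : Nat) : Int) := by
  unfold zienAantalRood
  rw [show (fun (aantalRood : Int) (j : Int) =>
        if PySem.List.pyGetD cs j ' ' = 'R' then aantalRood + 1 else aantalRood)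
      = (fun aantalRood j =>
        if (PySem.List.pyGetD cs j ' ' == 'R') = true then aantalRood + 1 else aantalRood) from by
    funext aantalRood j; simp]
  rw [PySem.List.foldl_count_if, PySem.List.pyRange_neg_one_eq_reverse, List.countP_reverse]
  simp only [show (-1 : Int) + 1 = 0 from rfl]
  rw [PySem.List.pyRange_one, List.countP_map]
  rw [show ((k : Int) - 1 + 1 - 0).toNat = k from by omega]
  simp only [Int.zero_add, Nat.cast_inj]
  induction k with
  | zero => simp
  | succ m ih =>
    have hm : m ≤ cs.length := by omega
    rw [List.range_succ, List.countP_append, ih hm]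
    have ht : cs.take (m + 1) = cs.take m ++ [cs[m]] := by
      rw [List.take_add_one]; simp [List.getElem?_eq_getElem (by omega : m < cs.length)]
    rw [ht, List.count_append, List.count_singleton]
    simp only [List.countP_cons, List.countP_nil, Function.comp, zero_add]
    congr 1
    · simp only [PySem.List.pyGetD_natCast, List.getD_eq_getElem?_getD,
        List.getElem?_eq_getElem (by omega : m < cs.length), Option.getD_some, beq_iff_eq]
      by_cases h : cs[m] = 'R' <;> simp [h] <;> assumption

-- A equals the reference map
lemma zien_eq_ref (invoer : String) : zien invoer = zienRef invoer.toList := by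
  unfold zien zienRef
  set cs := invoer.toList with hcs
  simp only [PySem.List.len_eq]
  rw [show (fun (nieuweLijst : List String) (i : Int) =>
        let aantalRood := zienAantalRood cs i
        if PySem.Int.mod aantalRood 2 = 0 then nieuweLijst ++ ["B"] else nieuweLijst ++ ["R"])
      = (fun nieuweLijst i => nieuweLijst ++
          [if PySem.Int.mod (zienAantalRood cs i) 2 = 0 then "B" else "R"]) from by
    funext acc i
    show (if PySem.Int.mod (zienAantalRood cs i) 2 = 0 then acc ++ ["B"] else acc ++ ["R"]) = _
    split <;> rfl]
  rw [PySem.List.foldl_append_singleton_eq_map]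
  rw [PySem.List.pyRange_neg_one_eq_reverse]
  simp only [show (-1 : Int) + 1 = 0 from rfl, List.map_reverse, List.reverse_reverse,
    List.nil_append]
  rw [PySem.List.pyRange_one]
  rw [show ((cs.length : Int) - 1 + 1 - 0).toNat = cs.length from by omega]
  rw [List.map_map]
  apply List.map_congr_left
  intro k hk
  rw [List.mem_range] at hk
  simp only [Function.comp, zero_add, zienAantalRood_eq cs k (by omega),
    PySem.Int.mod_eq_emod_of_pos (show (0 : Int) < 2 by norm_num)]

-- B's loop invariant: starting from (out, count of 'R' in a processed prefix p),
-- the fold appends exactly the reference outputs shifted by that count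
lemma zien_alt_invariant (cs : List Char) (out : List String) (c0 : Nat) :
    cs.foldl (fun (st : List String × Int) kleur =>
        (st.1 ++ [if PySem.Int.mod st.2 2 = 0 then "B" else "R"],
         if kleur = 'R' then st.2 + 1 else st.2)) (out, (c0 : Int))
      = (out ++ (List.range cs.length).map (fun k =>
            if (((c0 + (cs.take k).count 'R' : Nat) : Int)) % 2 = 0 then "B" else "R"),
         ((c0 + cs.count 'R' : Nat) : Int)) := by
  induction cs generalizing out c0 with
  | nil => simp
  | cons c t ih =>
    simp only [List.foldl_cons]
    rw [show (if c = 'R' then ((c0 : Int)) + 1 else (c0 : Int))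
        = ((if c = 'R' then c0 + 1 else c0 : Nat) : Int) from by split <;> simp]
    rw [ih]
    simp only [Prod.mk.injEq]
    refine ⟨?_, ?_⟩
    · rw [List.length_cons, List.range_succ_eq_map]
      simp only [List.map_cons, List.map_map, List.take_zero, List.count_nil, Nat.add_zero,
        List.append_assoc, List.singleton_append]
      rw [PySem.Int.mod_eq_emod_of_pos (show (0 : Int) < 2 by norm_num)]
      rw [List.append_right_inj, List.cons_eq_cons]
      refine ⟨rfl, ?_⟩
      apply List.map_congr_left
      intro k _
      simp only [Function.comp_apply, Nat.succ_eq_add_one, List.take_succ_cons, List.count_cons]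
      rcases decEq c 'R' with h | h <;> simp [h] <;> ring_nf
    · rcases decEq c 'R' with h | h <;> simp [h, Int.add_comm, Int.add_assoc, Int.add_left_comm]

lemma zien_alt_eq_ref (invoer : String) : zien_alt invoer = zienRef invoer.toList := by
  unfold zien_alt zienRef
  have := zien_alt_invariant invoer.toList [] 0
  simp only [Nat.cast_zero] at this
  rw [this]
  simp

-- ===== VERDICT (by name: the statement is the Claim_ definition above) =====
theorem zien_spec : Claim_equal_zien := by
  intro invoer _
  unfold Spec_zien
  rw [zien_eq_ref, zien_alt_eq_ref]
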